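-- pv_equiv track=rewrite | github.com/kotama7/AI-Scientist-v2-HPC | ai_scientist/treesearch/utils/memory_viz.py | _sort_phases
-- ===== SOURCE A (Python) =====
-- def _sort_phases(phases: set[str]) -> list[str]:
--     """Sort phases in canonical order."""
--     phase_order = ["phase0", "phase1", "phase2", "phase3", "phase4", "summary"]
--     sorted_phases = []
--     for p in phase_order:
--         if p in phases:
--             sorted_phases.append(p)
--     for p in sorted(phases):
--         if p not in sorted_phases:
--             sorted_phases.append(p)
--     return sorted_phases
-- ===== SOURCE B (Python) =====
-- def _sort_phases(phases: set[str]) -> list[str]: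
--     """Sort phases in canonical order."""
--     phase_order = ["phase0", "phase1", "phase2", "phase3", "phase4", "summary"]
--
--     def rank(p):
--         return phase_order.index(p) if p in phase_order else len(phase_order)
--
--     return sorted(phases, key=lambda p: (rank(p), p))
-- ===== Notes on version B (the rewrite author's own statement) =====
-- stated objective: faster
-- what changed: Replaces A's two sequential passes (canonical scan, then a sorted pass with an O(n) dedup membership scan of the growing output) by one O(n log n) sort with the tuple key (rank(p), p), rank being the canonical index or 6 for non-canonical phases.
import Mathlib
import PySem

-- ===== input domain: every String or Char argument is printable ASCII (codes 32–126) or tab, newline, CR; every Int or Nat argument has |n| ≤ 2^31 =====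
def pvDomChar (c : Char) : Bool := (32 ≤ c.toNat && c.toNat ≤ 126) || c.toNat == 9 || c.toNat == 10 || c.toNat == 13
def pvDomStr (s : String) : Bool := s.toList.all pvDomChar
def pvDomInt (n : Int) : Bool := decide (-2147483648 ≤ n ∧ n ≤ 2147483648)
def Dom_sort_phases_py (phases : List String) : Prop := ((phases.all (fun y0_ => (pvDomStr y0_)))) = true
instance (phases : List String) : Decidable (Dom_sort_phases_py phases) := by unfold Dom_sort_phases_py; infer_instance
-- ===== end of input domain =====

-- B replaces A's two passes (canonical scan + quadratic dedup-append of the sorted rest) by a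
-- single sort keyed on (canonical rank, name); objective: faster (measured).


-- ===== PORT A =====
def pvPhaseOrder : List String := ["phase0", "phase1", "phase2", "phase3", "phase4", "summary"]

def sort_phases_py (phases : List String) : List String :=
  let sorted_phases := pvPhaseOrder.foldl
    (fun acc p => if phases.contains p then acc ++ [p] else acc) []
  (PySem.List.sorted phases (fun p => p)).foldl
    (fun acc p => if acc.contains p then acc else acc ++ [p]) sorted_phases

-- ===== PORT B =====
-- rank(p) = phase_order.index(p) if p in phase_order else len(phase_order);
-- the membership guard makes .index total, so getD 0 is never the fallback.
def pvRankAlt (p : String) : Int :=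
  if pvPhaseOrder.contains p then ((PySem.List.index? pvPhaseOrder p).getD 0 : Nat) else 6

def sort_phases_py_alt (phases : List String) : List String :=
  PySem.List.sorted2 phases (fun p => pvRankAlt p) (fun p => p)

-- ===== PRECONDITION & SPEC =====
-- The Python parameter is a set[str]; per the type convention the list holds its DISTINCT
-- elements, so Pre_ requires Nodup. On a duplicate-bearing list (not a valid set encoding)
-- A's second loop happens to deduplicate while B's single sort keeps duplicates.
def Pre_sort_phases_py (phases : List String) : Prop := phases.Nodup
instance (phases : List String) : Decidable (Pre_sort_phases_py phases) := by unfold Pre_sort_phases_py; infer_instance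

def pvWitness_sort_phases_py : List String := ["phase1", "alpha", "summary"]

def Spec_sort_phases_py (phases : List String) (out : List String) : Prop := out = sort_phases_py_alt phases
instance (phases : List String) (out : List String) : Decidable (Spec_sort_phases_py phases out) := by unfold Spec_sort_phases_py; infer_instance

-- ===== CLAIM (what is proved, stated in full; the proofs are below) =====
def Claim_equal_sort_phases_py : Prop := ∀ (phases : List String), Dom_sort_phases_py phases → Pre_sort_phases_py phases → Spec_sort_phases_py phases (sort_phases_py phases)

-- ===== LEMMAS AND PROOFS =====

-- the two pieces A's passes produce: canonical phases present, then the sorted rest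
def pvF (phases : List String) : List String :=
  pvPhaseOrder.filter (fun p => phases.contains p)

def pvG (phases : List String) : List String :=
  (PySem.List.sorted phases (fun p => p)).filter (fun p => !(pvF phases).contains p)

-- B's tuple key as one lexicographic key
def pvKey (p : String) : Int ×ₗ String := toLex (pvRankAlt p, p)

theorem pv_alt_eq_sorted (phases : List String) :
    sort_phases_py_alt phases = PySem.List.sorted phases pvKey := by
  simp only [sort_phases_py_alt, PySem.List.sorted2, PySem.List.sorted]
  congr 1
  funext acc a
  congr 1
  funext x y
  rcases lt_trichotomy (pvRankAlt x) (pvRankAlt y) with h | h | h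
  · simp [pvKey, Prod.Lex.lt_iff, h]
  · simp [pvKey, Prod.Lex.lt_iff, h]
  · simp [pvKey, Prod.Lex.lt_iff, h, asymm h, h.ne']

theorem pv_dedup_fold (sp : List String) (hnd : sp.Nodup) : ∀ s1 : List String,
    sp.foldl (fun acc p => if acc.contains p then acc else acc ++ [p]) s1
      = s1 ++ sp.filter (fun p => !s1.contains p) := by
  induction sp with
  | nil => simp
  | cons p t ih =>
    intro s1
    have hpt : p ∉ t := (List.nodup_cons.mp hnd).1
    by_cases hc : s1.contains p
    · simp only [List.foldl_cons, List.filter_cons, hc]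
      simpa [hc] using ih (List.nodup_cons.mp hnd).2 s1
    · have hc' : s1.contains p = false := by simpa using hc
      simp only [List.foldl_cons, List.filter_cons, hc', Bool.false_eq_true,
        Bool.not_false, if_false, if_true]
      have hfe : t.filter (fun q => !(s1 ++ [p]).contains q) = t.filter (fun q => !s1.contains q) := by
        apply List.filter_congr
        intro q hq
        have hqp : q ≠ p := fun h => hpt (h ▸ hq)
        simp [hqp]
      rw [ih (List.nodup_cons.mp hnd).2 (s1 ++ [p]), hfe]
      simp

theorem pv_rank_lt_of_mem {a : String} (h : a ∈ pvPhaseOrder) : pvRankAlt a < 6 := by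
  fin_cases h <;> decide

theorem pv_rank_of_not_mem {a : String} (h : a ∉ pvPhaseOrder) : pvRankAlt a = 6 := by
  unfold pvRankAlt
  rw [if_neg]
  simpa [List.contains_iff_mem] using h

theorem pv_mem_F {phases : List String} {x : String} :
    x ∈ pvF phases ↔ x ∈ pvPhaseOrder ∧ x ∈ phases := by
  simp [pvF, List.mem_filter]

theorem pv_mem_G {phases : List String} {x : String} :
    x ∈ pvG phases ↔ x ∈ phases ∧ x ∉ pvPhaseOrder := by
  constructor
  · intro hx
    rw [pvG, List.mem_filter] at hx
    have hxp : x ∈ phases :=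
      (PySem.List.sorted_perm phases (fun p => p) false).mem_iff.mp hx.1
    refine ⟨hxp, fun hmem => ?_⟩
    have : x ∈ pvF phases := pv_mem_F.mpr ⟨hmem, hxp⟩
    simp [this] at hx
  · intro ⟨hxp, hxo⟩
    rw [pvG, List.mem_filter]
    refine ⟨(PySem.List.sorted_perm phases (fun p => p) false).mem_iff.mpr hxp, ?_⟩
    simp
    intro hxf
    exact hxo (pv_mem_F.mp hxf).1

theorem pv_A_eq (phases : List String) (hnd : phases.Nodup) :
    sort_phases_py phases = pvF phases ++ pvG phases := by
  have hspnd : (PySem.List.sorted phases (fun p => p)).Nodup :=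
    (PySem.List.sorted_perm phases (fun p => p) false).symm.nodup hnd
  unfold sort_phases_py
  rw [PySem.List.foldl_append_if, pv_dedup_fold _ hspnd]
  simp only [List.nil_append, List.map_id']
  rfl

theorem pv_perm (phases : List String) (hnd : phases.Nodup) :
    (pvF phases ++ pvG phases).Perm phases := by
  have hsp := PySem.List.sorted_perm phases (fun p => p) false
  have hspnd : (PySem.List.sorted phases (fun p => p)).Nodup := hsp.symm.nodup hnd
  have hFnd : (pvF phases).Nodup := List.filter_sublist.nodup (by decide)
  have hF' : (pvF phases).Perm
      ((PySem.List.sorted phases (fun p => p)).filter (fun p => (pvF phases).contains p)) := by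
    apply (List.perm_ext_iff_of_nodup hFnd (List.filter_sublist.nodup hspnd)).mpr
    intro x
    rw [pv_mem_F, List.mem_filter, hsp.mem_iff]
    simp only [List.contains_iff_mem, pv_mem_F]
    tauto
  have h2 : ((PySem.List.sorted phases (fun p => p)).filter (fun p => (pvF phases).contains p)
      ++ pvG phases).Perm (PySem.List.sorted phases (fun p => p)) := by
    unfold pvG
    exact List.filter_append_perm _ _
  exact ((hF'.append_right _).trans h2).trans hsp

theorem pv_pairwise (phases : List String) (hnd : phases.Nodup) :
    (pvF phases ++ pvG phases).Pairwise (fun a b => pvKey a < pvKey b) := by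
  have hsp := PySem.List.sorted_perm phases (fun p => p) false
  have hspnd : (PySem.List.sorted phases (fun p => p)).Nodup := hsp.symm.nodup hnd
  rw [List.pairwise_append]
  refine ⟨List.Pairwise.sublist List.filter_sublist (by decide), ?_, ?_⟩
  · have hle : (PySem.List.sorted phases (fun p => p)).Pairwise
        (fun a b : String => a ≤ b) := by
      simpa using PySem.List.sorted_pairwise phases (fun p : String => p)
    have hlt : (PySem.List.sorted phases (fun p => p)).Pairwise
        (fun a b : String => a < b) :=
      (hle.and hspnd).imp (fun h => lt_of_le_of_ne h.1 h.2)
    refine List.Pairwise.imp_of_mem ?_ (List.Pairwise.sublist List.filter_sublist hlt)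
    intro a b ha hb hab
    have h6a := pv_rank_of_not_mem (pv_mem_G.mp ha).2
    have h6b := pv_rank_of_not_mem (pv_mem_G.mp hb).2
    simp [pvKey, Prod.Lex.lt_iff, h6a, h6b, hab]
  · intro a ha b hb
    have hlt6 : pvRankAlt a < 6 := pv_rank_lt_of_mem (pv_mem_F.mp ha).1
    have h6b := pv_rank_of_not_mem (pv_mem_G.mp hb).2
    simp only [pvKey, Prod.Lex.lt_iff, ofLex_toLex]
    left
    omega

-- ===== VERDICT (by name: the statement is the Claim_ definition above) =====
theorem sort_phases_py_spec : Claim_equal_sort_phases_py := by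
  intro phases _ hnd
  unfold Spec_sort_phases_py
  rw [pv_alt_eq_sorted, pv_A_eq phases hnd]
  exact (PySem.List.sorted_eq_of_perm_of_pairwise_lt _ _ _ (pv_perm phases hnd)
    (pv_pairwise phases hnd)).symm
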